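-- pv_equiv track=rewrite | github.com/hrluo/TopologicalMotionSeries | Transforms.py | T_I
-- ===== SOURCE A (Python) =====
-- def T_I(c):
--     if c[0] <= c[-1]:
--         return c.copy()
--     else:
--         cc = c.copy()
--         for i in range(len(c) - 1):
--             cc[i+1] = cc[i] + c[i] - c[i+1]
--         return cc
-- ===== SOURCE B (Python) =====
-- def T_I(c):
--     if c[0] <= c[-1]:
--         return c.copy()
--     else:
--         cc = c.copy()
--         cc[1:] = [2 * c[0] - x for x in c[1:]]
--         return cc
-- ===== Notes on version B (the rewrite author's own statement) =====
-- stated objective: simpler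
-- what changed: Replaces the sequential accumulator recurrence (each new cell computed from the previous cell plus a difference of neighbours) with the closed form 'twice the first element minus x' applied independently to each tail element via one slice assignment.
import Mathlib
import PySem

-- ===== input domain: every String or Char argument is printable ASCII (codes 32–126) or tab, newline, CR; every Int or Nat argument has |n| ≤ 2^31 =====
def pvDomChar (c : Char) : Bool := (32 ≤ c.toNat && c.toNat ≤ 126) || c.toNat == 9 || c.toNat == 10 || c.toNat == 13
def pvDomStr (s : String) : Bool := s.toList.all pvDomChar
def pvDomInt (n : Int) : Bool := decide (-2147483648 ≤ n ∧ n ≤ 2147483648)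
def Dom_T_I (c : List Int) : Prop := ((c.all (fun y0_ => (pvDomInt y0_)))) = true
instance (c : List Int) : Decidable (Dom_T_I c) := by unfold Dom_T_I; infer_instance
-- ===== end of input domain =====

-- B replaces A's sequential recurrence cc[i+1] = cc[i] + c[i] - c[i+1] with the
-- closed form cc[i] = 2*c[0] - c[i] applied independently to each tail element (objective: simpler).

-- ===== PORT A =====
def T_I (c : List Int) : List Int :=
  if c.getD 0 0 ≤ c.getD (c.length - 1) 0 then c
  else (List.range (c.length - 1)).foldl
    (fun cc i => cc.set (i + 1) (cc.getD i 0 + c.getD i 0 - c.getD (i + 1) 0)) c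

-- ===== PORT B =====
def T_I_alt (c : List Int) : List Int :=
  if c.getD 0 0 ≤ c.getD (c.length - 1) 0 then c
  else
    match c with
    | [] => []
    | c0 :: t => c0 :: t.map (fun x => 2 * c0 - x)

-- ===== PRECONDITION & SPEC =====
-- Pre_ excludes only the empty list, on which Python A raises IndexError when indexing the first element.
def Pre_T_I (c : List Int) : Prop := c ≠ []
instance (c : List Int) : Decidable (Pre_T_I c) := by unfold Pre_T_I; infer_instance
def pvWitness_T_I : List Int := [3, 1, 2]

def Spec_T_I (c : List Int) (out : List Int) : Prop := out = T_I_alt c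
instance (c : List Int) (out : List Int) : Decidable (Spec_T_I c out) := by unfold Spec_T_I; infer_instance

-- ===== CLAIM (what is proved, stated in full; the proofs are below) =====
def Claim_equal_T_I : Prop := ∀ (c : List Int), Dom_T_I c → Pre_T_I c → Spec_T_I c (T_I c)

-- ===== LEMMAS AND PROOFS =====

-- loop invariant: after k iterations the prefix positions 1..k hold 2*c0 - c[i], the rest is untouched
lemma T_I_loop_inv (c0 : Int) (t : List Int) (k : Nat) (hk : k ≤ t.length) :
    (List.range k).foldl
      (fun cc i => cc.set (i + 1) (cc.getD i 0 + (c0 :: t).getD i 0 - (c0 :: t).getD (i + 1) 0))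
      (c0 :: t)
    = c0 :: ((t.take k).map (fun x => 2 * c0 - x) ++ t.drop k) := by
  induction k with
  | zero => simp
  | succ k ih =>
    have hk' : k ≤ t.length := Nat.le_of_succ_le hk
    have hkl : k < t.length := hk
    rw [List.range_succ, List.foldl_append, ih hk']
    simp only [List.foldl_cons, List.foldl_nil]
    have hlen : ((t.take k).map (fun x => 2 * c0 - x)).length = k := by
      simp [List.length_take, Nat.min_eq_left hk']
    have hdrop : t.drop k = t[k] :: t.drop (k + 1) := List.drop_eq_getElem_cons hkl
    have htake : t.take (k + 1) = t.take k ++ [t[k]] := by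
      rw [List.take_add_one]
      simp [List.getElem?_eq_getElem hkl]
    have hval :
        (c0 :: ((t.take k).map (fun x => 2 * c0 - x) ++ t.drop k)).getD k 0
          + (c0 :: t).getD k 0 - (c0 :: t).getD (k + 1) 0
        = 2 * c0 - t[k] := by
      have hget : t.getD k 0 = t[k] := List.getD_eq_getElem t 0 hkl
      cases k with
      | zero =>
        simp only [List.getD_cons_zero, List.getD_cons_succ] at *
        rw [hget]; ring
      | succ j =>
        have hj : j < t.length := Nat.lt_of_succ_lt hkl
        have hjk : j < ((t.take (j+1)).map (fun x => 2 * c0 - x)).length := by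
          rw [hlen]; exact Nat.lt_succ_self j
        have hgj : t.getD j 0 = t[j] := List.getD_eq_getElem t 0 hj
        simp only [List.getD_cons_succ]
        rw [List.getD_append _ _ _ _ hjk, List.getD_eq_getElem _ _ hjk, hget, hgj]
        simp only [List.getElem_map, List.getElem_take]
        ring
    calc (c0 :: ((t.take k).map (fun x => 2 * c0 - x) ++ t.drop k)).set (k + 1)
            ((c0 :: ((t.take k).map (fun x => 2 * c0 - x) ++ t.drop k)).getD k 0
              + (c0 :: t).getD k 0 - (c0 :: t).getD (k + 1) 0)
        = c0 :: (((t.take k).map (fun x => 2 * c0 - x) ++ t.drop k).set k (2 * c0 - t[k])) := by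
          rw [hval]; rfl
      _ = c0 :: ((t.take (k+1)).map (fun x => 2 * c0 - x) ++ t.drop (k+1)) := by
          rw [List.set_append, hlen]
          simp only [lt_irrefl, Nat.sub_self]
          rw [hdrop, htake]
          simp only [List.set_cons_zero, List.map_append, List.map_cons, List.map_nil,
            List.append_assoc, List.cons_append, List.nil_append, if_false]

theorem T_I_spec : Claim_equal_T_I := by
  intro c hd hp
  unfold Spec_T_I T_I T_I_alt
  split
  · rfl
  · match c, hp with
    | c0 :: t, _ =>
      have h := T_I_loop_inv c0 t t.length (le_refl _)
      simp only [List.length_cons, Nat.add_sub_cancel] at *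
      rw [h]
      simp
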